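-- pv_equiv track=rewrite | github.com/steagsInc/Projet_Kilobots | Src/milolib/toussaint.py | TriPixel
-- ===== SOURCE A (Python) =====
-- def TriPixel(points) :
--     """
--     prend un ensemble de points sous la forme d'une liste de paires en entrée
--
--     renvoie un ensemble de points sous la forme d'une liste de paires tel
--     que les points conpris entre deux autres points sur une même colonne
--     ont été supprimés
--     """
--
--     ymin = 100000000
--     ymax =  -100000000
--     xmin = 10000000
--     xmax = -100000000
--
--     for i in points :
--         if i[0] < xmin :
--             xmin = i[0]
--         if i[0] > xmax :
--             xmax = i[0]
--         if i[1] < ymin :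
--             ymin = i[1]
--         if i[1] > ymax :
--             ymax = i[1]
--
--     ymins = []
--     ymaxs = []
--
--     for a in range(xmax-xmin+1) :
--         ymins.append(ymax + 1)
--         ymaxs.append(ymin - 1)
--
--     for i in points :
--         if i[1] < ymins[i[0] - xmin] :
--             ymins[i[0]-xmin] = i[1]
--         if i[1] > ymaxs[i[0] - xmin] :
--             ymaxs[i[0]-xmin] = i[1]
--
--
--     points2 = []
--
--     for a in range(len(ymins)) :
--         if(ymins[a] != ymax+1  ) :
--             points2.append((a+xmin, ymins[a]))
--         if(ymaxs[a] != ymin-1 and ymins[a] != ymaxs[a]) :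
--             points2.append((a+xmin, ymaxs[a]))
--
--     return points2
-- ===== SOURCE B (Python) =====
-- def TriPixel(points):
--     # keep only each column's extreme (min/max y) points, columns in increasing x
--     xs = sorted(set(p[0] for p in points))
--     points2 = []
--     for x in xs:
--         ys = [p[1] for p in points if p[0] == x]
--         lo = min(ys)
--         hi = max(ys)
--         points2.append((x, lo))
--         if hi != lo:
--             points2.append((x, hi))
--     return points2
-- ===== Notes on version B (the rewrite author's own statement) =====
-- stated objective: simpler
-- what changed: A buckets points into two dense sentinel-initialized arrays spanning the whole x-range and scans that range; B sorts the distinct x values and, per column, takes min/max of that column's y values, so the sentinel constants and the O(xmax-xmin) arrays disappear (and B uses O(n) memory instead of O(xmax-xmin), a real difference when x coordinates are spread out).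
import Mathlib
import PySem

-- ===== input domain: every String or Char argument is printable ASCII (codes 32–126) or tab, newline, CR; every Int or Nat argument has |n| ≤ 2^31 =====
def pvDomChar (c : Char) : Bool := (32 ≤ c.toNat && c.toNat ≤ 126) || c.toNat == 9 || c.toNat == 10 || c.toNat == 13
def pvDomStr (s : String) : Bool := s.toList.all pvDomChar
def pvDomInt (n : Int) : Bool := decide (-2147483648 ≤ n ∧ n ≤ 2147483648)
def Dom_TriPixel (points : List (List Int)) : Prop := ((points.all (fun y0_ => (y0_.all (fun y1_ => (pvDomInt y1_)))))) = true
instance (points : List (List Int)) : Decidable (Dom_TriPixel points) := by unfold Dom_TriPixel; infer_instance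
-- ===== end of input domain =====

-- B replaces A's sentinel-initialized dense arrays over the whole x-range by sorting the distinct
-- x values and taking each column's min/max y directly: simpler, no sentinels, O(n) memory.

-- ===== PORT A =====
-- i[0] / i[1]: IndexError on a point shorter than 2 is excluded by Pre_; the .getD 0 default is never the value used inside Pre_
def pvAt (p : List Int) (k : Int) : Int := (PySem.List.pyGet? p k).getD 0

def TriPixel (points : List (List Int)) : List (List Int) :=
  let s := points.foldl (fun (s : Int × Int × Int × Int) i =>
    let xmin' := if pvAt i 0 < s.2.2.1 then pvAt i 0 else s.2.2.1
    let xmax' := if pvAt i 0 > s.2.2.2 then pvAt i 0 else s.2.2.2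
    let ymin' := if pvAt i 1 < s.1 then pvAt i 1 else s.1
    let ymax' := if pvAt i 1 > s.2.1 then pvAt i 1 else s.2.1
    (ymin', ymax', xmin', xmax')) (100000000, -100000000, 10000000, -100000000)
  let ymin := s.1
  let ymax := s.2.1
  let xmin := s.2.2.1
  let xmax := s.2.2.2
  let init := (PySem.List.pyRange 0 (xmax - xmin + 1) 1).foldl
    (fun (ac : List Int × List Int) _ => (ac.1 ++ [ymax + 1], ac.2 ++ [ymin - 1])) ([], [])
  -- ymins[i[0]-xmin] = …: the index is provably in [0, len) on every admitted input, so List.set at .toNat is exact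
  let upd := points.foldl (fun (ac : List Int × List Int) i =>
    let m := if pvAt i 1 < PySem.List.pyGetD ac.1 (pvAt i 0 - xmin) 0 then ac.1.set (pvAt i 0 - xmin).toNat (pvAt i 1) else ac.1
    let M := if pvAt i 1 > PySem.List.pyGetD ac.2 (pvAt i 0 - xmin) 0 then ac.2.set (pvAt i 0 - xmin).toNat (pvAt i 1) else ac.2
    (m, M)) (init.1, init.2)
  let ymins := upd.1
  let ymaxs := upd.2
  (PySem.List.pyRange 0 (ymins.length : Int) 1).foldl (fun acc a =>
    let acc1 := if PySem.List.pyGetD ymins a 0 ≠ ymax + 1 then acc ++ [[a + xmin, PySem.List.pyGetD ymins a 0]] else acc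
    if PySem.List.pyGetD ymaxs a 0 ≠ ymin - 1 ∧ PySem.List.pyGetD ymins a 0 ≠ PySem.List.pyGetD ymaxs a 0 then acc1 ++ [[a + xmin, PySem.List.pyGetD ymaxs a 0]] else acc1) []

-- ===== PORT B =====
def TriPixel_alt (points : List (List Int)) : List (List Int) :=
  let xs := PySem.List.sorted (PySem.Set.ofList (points.map (fun p => pvAt p 0))) (fun x => x) false
  xs.foldl (fun acc x =>
    let ys := (points.filter (fun p => pvAt p 0 == x)).map (fun p => pvAt p 1)
    -- min(ys)/max(ys): ys is nonempty for every x drawn from points, so the .getD 0 default is never reached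
    let lo := (PySem.List.min? ys (fun y => y)).getD 0
    let hi := (PySem.List.max? ys (fun y => y)).getD 0
    let acc1 := acc ++ [[x, lo]]
    if hi ≠ lo then acc1 ++ [[x, hi]] else acc1) []

-- ===== PRECONDITION & SPEC =====
-- Pre_ excludes exactly the inputs where Python A raises IndexError: a point with fewer than two coordinates.
def Pre_TriPixel (points : List (List Int)) : Prop := ∀ p ∈ points, 2 ≤ p.length
instance (points : List (List Int)) : Decidable (Pre_TriPixel points) := by unfold Pre_TriPixel; infer_instance
def pvWitness_TriPixel : List (List Int) := [[0, 1], [0, 3], [2, 2], [-1, 5]]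

def Spec_TriPixel (points : List (List Int)) (out : List (List Int)) : Prop := out = TriPixel_alt points
instance (points : List (List Int)) (out : List (List Int)) : Decidable (Spec_TriPixel points out) := by unfold Spec_TriPixel; infer_instance

-- ===== CLAIM (what is proved, stated in full; the proofs are below) =====
def Claim_equal_TriPixel : Prop := ∀ (points : List (List Int)), Dom_TriPixel points → Pre_TriPixel points → Spec_TriPixel points (TriPixel points)

-- ===== LEMMAS AND PROOFS =====

-- the y values of the column at x (B's list comprehension)
def pvCol (points : List (List Int)) (x : Int) : List Int :=
  (points.filter (fun p => pvAt p 0 == x)).map (fun p => pvAt p 1)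

-- the four extrema A's first loop computes
def pvX (points : List (List Int)) : List Int := points.map (fun p => pvAt p 0)
def pvY (points : List (List Int)) : List Int := points.map (fun p => pvAt p 1)
def pvXmin (points : List (List Int)) : Int := (pvX points).foldl min 10000000
def pvXmax (points : List (List Int)) : Int := (pvX points).foldl max (-100000000)
def pvYmin (points : List (List Int)) : Int := (pvY points).foldl min 100000000
def pvYmax (points : List (List Int)) : Int := (pvY points).foldl max (-100000000)

-- what one iteration of A's output loop appends for column index a
def pvEmitA (ymins ymaxs : List Int) (ymin ymax xmin : Int) (a : Int) : List (List Int) :=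
  (if PySem.List.pyGetD ymins a 0 ≠ ymax + 1 then [[a + xmin, PySem.List.pyGetD ymins a 0]] else []) ++
  (if PySem.List.pyGetD ymaxs a 0 ≠ ymin - 1 ∧ PySem.List.pyGetD ymins a 0 ≠ PySem.List.pyGetD ymaxs a 0
    then [[a + xmin, PySem.List.pyGetD ymaxs a 0]] else [])

-- what one iteration of B's loop appends for column x
def pvEmitB (points : List (List Int)) (x : Int) : List (List Int) :=
  [[x, ((PySem.List.min? (pvCol points x) (fun y => y)).getD 0)]] ++
  (if ((PySem.List.max? (pvCol points x) (fun y => y)).getD 0) ≠ ((PySem.List.min? (pvCol points x) (fun y => y)).getD 0)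
    then [[x, ((PySem.List.max? (pvCol points x) (fun y => y)).getD 0)]] else [])

-- A's first loop is four independent running min/max folds
lemma pvFold4 (pts : List (List Int)) : ∀ (a b c d : Int),
    pts.foldl (fun (s : Int × Int × Int × Int) i =>
      let xmin' := if pvAt i 0 < s.2.2.1 then pvAt i 0 else s.2.2.1
      let xmax' := if pvAt i 0 > s.2.2.2 then pvAt i 0 else s.2.2.2
      let ymin' := if pvAt i 1 < s.1 then pvAt i 1 else s.1
      let ymax' := if pvAt i 1 > s.2.1 then pvAt i 1 else s.2.1
      (ymin', ymax', xmin', xmax')) (a, b, c, d)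
    = ((pts.map (fun p => pvAt p 1)).foldl min a, (pts.map (fun p => pvAt p 1)).foldl max b,
       (pts.map (fun p => pvAt p 0)).foldl min c, (pts.map (fun p => pvAt p 0)).foldl max d) := by
  induction pts with
  | nil => intro a b c d; rfl
  | cons p t ih =>
    intro a b c d
    have e1 : ∀ u v : Int, (if u < v then u else v) = min v u := by
      intro u v; split_ifs <;> omega
    have e2 : ∀ u v : Int, (if u > v then u else v) = max v u := by
      intro u v; split_ifs <;> omega
    simp only [List.foldl_cons, List.map_cons]
    rw [ih]
    simp only [e1, e2]

-- A's second loop builds two replicate lists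
lemma pvRep (l : List Int) : ∀ (ac : List Int × List Int) (c d : Int),
    l.foldl (fun (ac : List Int × List Int) _ => (ac.1 ++ [c], ac.2 ++ [d])) ac
    = (ac.1 ++ List.replicate l.length c, ac.2 ++ List.replicate l.length d) := by
  induction l with
  | nil => intro ac c d; simp
  | cons x t ih =>
    intro ac c d
    simp only [List.foldl_cons, List.length_cons, List.replicate_succ]
    rw [ih]
    simp

-- A's update loop: elementwise characterization of the two arrays
lemma pvUpd (xmin : Int) (pts : List (List Int)) : ∀ (mins maxs : List Int),
    (∀ p ∈ pts, 0 ≤ pvAt p 0 - xmin ∧ pvAt p 0 - xmin < (mins.length : Int)) →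
    maxs.length = mins.length →
    (pts.foldl (fun (ac : List Int × List Int) i =>
      let m := if pvAt i 1 < PySem.List.pyGetD ac.1 (pvAt i 0 - xmin) 0 then ac.1.set (pvAt i 0 - xmin).toNat (pvAt i 1) else ac.1
      let M := if pvAt i 1 > PySem.List.pyGetD ac.2 (pvAt i 0 - xmin) 0 then ac.2.set (pvAt i 0 - xmin).toNat (pvAt i 1) else ac.2
      (m, M)) (mins, maxs)).1.length = mins.length ∧
    (pts.foldl (fun (ac : List Int × List Int) i =>
      let m := if pvAt i 1 < PySem.List.pyGetD ac.1 (pvAt i 0 - xmin) 0 then ac.1.set (pvAt i 0 - xmin).toNat (pvAt i 1) else ac.1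
      let M := if pvAt i 1 > PySem.List.pyGetD ac.2 (pvAt i 0 - xmin) 0 then ac.2.set (pvAt i 0 - xmin).toNat (pvAt i 1) else ac.2
      (m, M)) (mins, maxs)).2.length = mins.length ∧
    ∀ k : Nat, k < mins.length →
      (pts.foldl (fun (ac : List Int × List Int) i =>
        let m := if pvAt i 1 < PySem.List.pyGetD ac.1 (pvAt i 0 - xmin) 0 then ac.1.set (pvAt i 0 - xmin).toNat (pvAt i 1) else ac.1
        let M := if pvAt i 1 > PySem.List.pyGetD ac.2 (pvAt i 0 - xmin) 0 then ac.2.set (pvAt i 0 - xmin).toNat (pvAt i 1) else ac.2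
        (m, M)) (mins, maxs)).1.getD k 0 = (pvCol pts (xmin + k)).foldl min (mins.getD k 0) ∧
      (pts.foldl (fun (ac : List Int × List Int) i =>
        let m := if pvAt i 1 < PySem.List.pyGetD ac.1 (pvAt i 0 - xmin) 0 then ac.1.set (pvAt i 0 - xmin).toNat (pvAt i 1) else ac.1
        let M := if pvAt i 1 > PySem.List.pyGetD ac.2 (pvAt i 0 - xmin) 0 then ac.2.set (pvAt i 0 - xmin).toNat (pvAt i 1) else ac.2
        (m, M)) (mins, maxs)).2.getD k 0 = (pvCol pts (xmin + k)).foldl max (maxs.getD k 0) := by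
  induction pts with
  | nil =>
    intro mins maxs h hl
    exact ⟨rfl, hl, fun k hk => ⟨by simp [pvCol], by simp [pvCol]⟩⟩
  | cons p t ih =>
    intro mins maxs h hl
    obtain ⟨hp0, hp1⟩ := h p (by simp)
    have hixlt : (pvAt p 0 - xmin).toNat < mins.length := by omega
    have hlm : (if pvAt p 1 < PySem.List.pyGetD mins (pvAt p 0 - xmin) 0 then mins.set (pvAt p 0 - xmin).toNat (pvAt p 1) else mins).length = mins.length := by
      split_ifs <;> simp
    have hlM : (if pvAt p 1 > PySem.List.pyGetD maxs (pvAt p 0 - xmin) 0 then maxs.set (pvAt p 0 - xmin).toNat (pvAt p 1) else maxs).length = mins.length := by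
      split_ifs <;> simp [hl]
    have h' : ∀ q ∈ t, 0 ≤ pvAt q 0 - xmin ∧ pvAt q 0 - xmin <
        ((if pvAt p 1 < PySem.List.pyGetD mins (pvAt p 0 - xmin) 0 then mins.set (pvAt p 0 - xmin).toNat (pvAt p 1) else mins).length : Int) := by
      intro q hq
      rw [hlm]
      exact h q (by simp [hq])
    obtain ⟨i1, i2, i3⟩ := ih _ _ h' (by rw [hlM, hlm])
    simp only [List.foldl_cons]
    refine ⟨by rw [i1, hlm], by rw [i2, hlm], ?_⟩
    intro k hk
    obtain ⟨j1, j2⟩ := i3 k (by rw [hlm]; exact hk)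
    rw [j1, j2]
    by_cases hc : pvAt p 0 = xmin + (k : Int)
    · have hkix : (pvAt p 0 - xmin).toNat = k := by omega
      have e1 : pvCol (p :: t) (xmin + (k : Int)) = pvAt p 1 :: pvCol t (xmin + (k : Int)) := by
        simp [pvCol, hc]
      have hm : (if pvAt p 1 < PySem.List.pyGetD mins (pvAt p 0 - xmin) 0 then mins.set (pvAt p 0 - xmin).toNat (pvAt p 1) else mins).getD k 0
          = min (mins.getD k 0) (pvAt p 1) := by
        rw [PySem.List.pyGetD_of_nonneg mins 0 hp0, hkix]
        split_ifs with hlt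
        · rw [List.getD_eq_getElem _ _ (by simp only [List.length_set]; omega), List.getElem_set_self]
          omega
        · omega
      have hM : (if pvAt p 1 > PySem.List.pyGetD maxs (pvAt p 0 - xmin) 0 then maxs.set (pvAt p 0 - xmin).toNat (pvAt p 1) else maxs).getD k 0
          = max (maxs.getD k 0) (pvAt p 1) := by
        rw [PySem.List.pyGetD_of_nonneg maxs 0 hp0, hkix]
        split_ifs with hlt
        · rw [List.getD_eq_getElem _ _ (by simp only [List.length_set]; omega), List.getElem_set_self]
          omega
        · omega
      rw [hm, hM, e1]
      constructor <;> simp [List.foldl_cons]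
    · have hkix : (pvAt p 0 - xmin).toNat ≠ k := by omega
      have e1 : pvCol (p :: t) (xmin + (k : Int)) = pvCol t (xmin + (k : Int)) := by
        simp [pvCol, hc]
      have hm : (if pvAt p 1 < PySem.List.pyGetD mins (pvAt p 0 - xmin) 0 then mins.set (pvAt p 0 - xmin).toNat (pvAt p 1) else mins).getD k 0
          = mins.getD k 0 := by
        split_ifs
        · rw [List.getD_eq_getElem?_getD, List.getElem?_set_ne hkix, ← List.getD_eq_getElem?_getD]
        · rfl
      have hM : (if pvAt p 1 > PySem.List.pyGetD maxs (pvAt p 0 - xmin) 0 then maxs.set (pvAt p 0 - xmin).toNat (pvAt p 1) else maxs).getD k 0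
          = maxs.getD k 0 := by
        split_ifs
        · rw [List.getD_eq_getElem?_getD, List.getElem?_set_ne hkix, ← List.getD_eq_getElem?_getD]
        · rfl
      rw [hm, hM, e1]
      exact ⟨rfl, rfl⟩

-- a flatMap whose body vanishes off a predicate can be restricted to the filtered list
lemma pvFlatMapIte {α : Type} (p : α → Bool) (f : α → List (List Int)) :
    ∀ l : List α, (l.filter p).flatMap f = l.flatMap (fun x => if p x then f x else []) := by
  intro l
  induction l with
  | nil => simp
  | cons x t ih =>
    by_cases hp : p x <;> simp [hp, ih]

lemma pvFlatMapCongr {α : Type} (l : List α) (f g : α → List (List Int)) (h : ∀ x ∈ l, f x = g x) :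
    l.flatMap f = l.flatMap g := by
  induction l with
  | nil => rfl
  | cons x t ih =>
    simp only [List.flatMap_cons]
    rw [h x (by simp), ih (fun y hy => h y (by simp [hy]))]

-- membership among the x values = nonempty column
lemma pvColNe (points : List (List Int)) (x : Int) :
    x ∈ points.map (fun p => pvAt p 0) ↔ pvCol points x ≠ [] := by
  constructor
  · intro hx hnil
    obtain ⟨p, hp, he⟩ := List.mem_map.mp hx
    rw [pvCol, List.map_eq_nil_iff, List.filter_eq_nil_iff] at hnil
    exact hnil p hp (by simp [he])
  · intro hne
    by_contra hx
    apply hne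
    rw [pvCol, List.map_eq_nil_iff, List.filter_eq_nil_iff]
    intro q hq hbeq
    exact hx (List.mem_map.mpr ⟨q, hq, by simpa using hbeq⟩)

-- A's output loop is a flatMap of pvEmitA (lambda stated in zeta-reduced form, as simp leaves it)
lemma pvA_flat (ymins ymaxs : List Int) (ymin ymax xmin : Int) (acc : List (List Int)) :
    (PySem.List.pyRange 0 (ymins.length : Int) 1).foldl (fun acc a =>
      if PySem.List.pyGetD ymaxs a 0 ≠ ymin - 1 ∧ PySem.List.pyGetD ymins a 0 ≠ PySem.List.pyGetD ymaxs a 0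
      then (if PySem.List.pyGetD ymins a 0 ≠ ymax + 1 then acc ++ [[a + xmin, PySem.List.pyGetD ymins a 0]] else acc) ++ [[a + xmin, PySem.List.pyGetD ymaxs a 0]]
      else (if PySem.List.pyGetD ymins a 0 ≠ ymax + 1 then acc ++ [[a + xmin, PySem.List.pyGetD ymins a 0]] else acc)) acc
    = acc ++ (PySem.List.pyRange 0 (ymins.length : Int) 1).flatMap (pvEmitA ymins ymaxs ymin ymax xmin) := by
  have hfun : (fun (acc : List (List Int)) (a : Int) =>
      if PySem.List.pyGetD ymaxs a 0 ≠ ymin - 1 ∧ PySem.List.pyGetD ymins a 0 ≠ PySem.List.pyGetD ymaxs a 0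
      then (if PySem.List.pyGetD ymins a 0 ≠ ymax + 1 then acc ++ [[a + xmin, PySem.List.pyGetD ymins a 0]] else acc) ++ [[a + xmin, PySem.List.pyGetD ymaxs a 0]]
      else (if PySem.List.pyGetD ymins a 0 ≠ ymax + 1 then acc ++ [[a + xmin, PySem.List.pyGetD ymins a 0]] else acc))
      = (fun acc a => acc ++ pvEmitA ymins ymaxs ymin ymax xmin a) := by
    funext acc a
    simp only [pvEmitA]
    split_ifs <;> simp
  rw [hfun, PySem.List.foldl_append_eq_flatMap]

-- B's loop is a flatMap of pvEmitB (lambda stated in zeta-reduced form)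
lemma pvB_flat (points : List (List Int)) (xs : List Int) (acc : List (List Int)) :
    xs.foldl (fun acc x =>
      if (PySem.List.max? ((points.filter (fun p => pvAt p 0 == x)).map (fun p => pvAt p 1)) (fun y => y)).getD 0
          ≠ (PySem.List.min? ((points.filter (fun p => pvAt p 0 == x)).map (fun p => pvAt p 1)) (fun y => y)).getD 0
      then (acc ++ [[x, (PySem.List.min? ((points.filter (fun p => pvAt p 0 == x)).map (fun p => pvAt p 1)) (fun y => y)).getD 0]])
            ++ [[x, (PySem.List.max? ((points.filter (fun p => pvAt p 0 == x)).map (fun p => pvAt p 1)) (fun y => y)).getD 0]]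
      else acc ++ [[x, (PySem.List.min? ((points.filter (fun p => pvAt p 0 == x)).map (fun p => pvAt p 1)) (fun y => y)).getD 0]]) acc
    = acc ++ xs.flatMap (pvEmitB points) := by
  have hfun : (fun (acc : List (List Int)) (x : Int) =>
      if (PySem.List.max? ((points.filter (fun p => pvAt p 0 == x)).map (fun p => pvAt p 1)) (fun y => y)).getD 0
          ≠ (PySem.List.min? ((points.filter (fun p => pvAt p 0 == x)).map (fun p => pvAt p 1)) (fun y => y)).getD 0
      then (acc ++ [[x, (PySem.List.min? ((points.filter (fun p => pvAt p 0 == x)).map (fun p => pvAt p 1)) (fun y => y)).getD 0]])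
            ++ [[x, (PySem.List.max? ((points.filter (fun p => pvAt p 0 == x)).map (fun p => pvAt p 1)) (fun y => y)).getD 0]]
      else acc ++ [[x, (PySem.List.min? ((points.filter (fun p => pvAt p 0 == x)).map (fun p => pvAt p 1)) (fun y => y)).getD 0]])
      = (fun acc x => acc ++ pvEmitB points x) := by
    funext acc x
    simp only [pvEmitB, pvCol]
    split_ifs <;> simp
  rw [hfun, PySem.List.foldl_append_eq_flatMap]

-- the extrema really bound every coordinate
lemma pvBounds (points : List (List Int)) (p : List Int) (hp : p ∈ points) :
    pvXmin points ≤ pvAt p 0 ∧ pvAt p 0 ≤ pvXmax points ∧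
    pvYmin points ≤ pvAt p 1 ∧ pvAt p 1 ≤ pvYmax points := by
  refine ⟨(PySem.List.foldl_min_le _ _).2 _ (List.mem_map_of_mem hp),
          (PySem.List.le_foldl_max _ _).2 _ (List.mem_map_of_mem hp),
          (PySem.List.foldl_min_le _ _).2 _ (List.mem_map_of_mem hp),
          (PySem.List.le_foldl_max _ _).2 _ (List.mem_map_of_mem hp)⟩

lemma pvColBounds (points : List (List Int)) (x : Int) :
    ∀ y ∈ pvCol points x, pvYmin points ≤ y ∧ y ≤ pvYmax points := by
  intro y hy
  obtain ⟨p, hp, he⟩ := List.mem_map.mp hy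
  obtain ⟨-, -, h1, h2⟩ := pvBounds points p (List.mem_of_mem_filter hp)
  exact ⟨he ▸ h1, he ▸ h2⟩

-- per-column: A's emitted pair list = B's emitted pair list
lemma pvEmit_eq (points : List (List Int)) (ymin ymax xmin : Int) (mins maxs : List Int) (k : Nat)
    (hmins : mins.getD k 0 = (pvCol points (xmin + (k : Int))).foldl min (ymax + 1))
    (hmaxs : maxs.getD k 0 = (pvCol points (xmin + (k : Int))).foldl max (ymin - 1))
    (hb : ∀ y ∈ pvCol points (xmin + (k : Int)), ymin ≤ y ∧ y ≤ ymax) :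
    pvEmitA mins maxs ymin ymax xmin (k : Int)
      = if pvCol points (xmin + (k : Int)) = [] then [] else pvEmitB points (xmin + (k : Int)) := by
  unfold pvEmitA
  rw [PySem.List.pyGetD_natCast, PySem.List.pyGetD_natCast, hmins, hmaxs]
  cases hcol : pvCol points (xmin + (k : Int)) with
  | nil => simp
  | cons y t =>
    rw [hcol] at hb
    obtain ⟨hy1, hy2⟩ := hb y (by simp)
    have hminfold : List.foldl min (ymax + 1) (y :: t) = List.foldl min y t := by
      simp only [List.foldl_cons]
      congr 1
      omega
    have hmaxfold : List.foldl max (ymin - 1) (y :: t) = List.foldl max y t := by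
      simp only [List.foldl_cons]
      congr 1
      omega
    have hlo : ymin ≤ List.foldl min y t ∧ List.foldl min y t ≤ ymax := by
      rcases PySem.List.foldl_min_mem t y with h | h
      · rw [h]; exact ⟨hy1, hy2⟩
      · exact hb _ (by simp [h])
    have hhi : ymin ≤ List.foldl max y t ∧ List.foldl max y t ≤ ymax := by
      rcases PySem.List.foldl_max_mem t y with h | h
      · rw [h]; exact ⟨hy1, hy2⟩
      · exact hb _ (by simp [h])
    rw [hminfold, hmaxfold]
    unfold pvEmitB
    rw [hcol, PySem.List.min?_id_cons, PySem.List.max?_id_cons]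
    simp only [Option.getD_some]
    have c1 : List.foldl min y t ≠ ymax + 1 := by omega
    rw [if_pos c1]
    have c2 : (List.foldl max y t ≠ ymin - 1 ∧ List.foldl min y t ≠ List.foldl max y t)
        = (List.foldl max y t ≠ List.foldl min y t) := by
      apply propext
      constructor
      · rintro ⟨-, h⟩; omega
      · intro h; exact ⟨by omega, by omega⟩
    simp only [c2]
    rw [Int.add_comm xmin (k : Int)]
    simp

-- reindex a flatMap over range(0, n)
lemma pvReindex (f : Int → List (List Int)) (n : Nat) :
    (PySem.List.pyRange 0 (n : Int) 1).flatMap f = List.flatMap (fun k : Nat => f (k : Int)) (List.range n) := by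
  rw [PySem.List.pyRange_one, List.flatMap_map]
  have hn : ((n : Int) - 0).toNat = n := by omega
  rw [hn]
  exact pvFlatMapCongr _ _ _ (fun x _ => by rw [zero_add])

-- ===== VERDICT (by name: the statement is the Claim_ definition above) =====
theorem TriPixel_spec : Claim_equal_TriPixel := by
  intro points _ _
  unfold Spec_TriPixel
  by_cases hne : points = []
  · subst hne; rfl
  · obtain ⟨q, hq⟩ := List.exists_mem_of_ne_nil points hne
    unfold TriPixel
    simp only [pvFold4]
    set ymin := (points.map (fun p => pvAt p 1)).foldl min 100000000 with hymin
    set ymax := (points.map (fun p => pvAt p 1)).foldl max (-100000000) with hymax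
    set xmin := (points.map (fun p => pvAt p 0)).foldl min 10000000 with hxmin
    set xmax := (points.map (fun p => pvAt p 0)).foldl max (-100000000) with hxmax
    have hbnd : ∀ p ∈ points, xmin ≤ pvAt p 0 ∧ pvAt p 0 ≤ xmax ∧ ymin ≤ pvAt p 1 ∧ pvAt p 1 ≤ ymax := by
      intro p hp
      have h := pvBounds points p hp
      rw [hymin, hymax, hxmin, hxmax]
      exact h
    have hxx : xmin ≤ xmax := by have := hbnd q hq; omega
    rw [pvRep]
    simp only [PySem.List.length_pyRange_one, sub_zero, List.nil_append]
    set n := (xmax - xmin + 1).toNat with hn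
    have hnI : (n : Int) = xmax - xmin + 1 := by rw [hn]; exact Int.toNat_of_nonneg (by omega)
    have harg : ∀ p ∈ points, 0 ≤ pvAt p 0 - xmin ∧ pvAt p 0 - xmin < ((List.replicate n (ymax + 1)).length : Int) := by
      intro p hp
      have := hbnd p hp
      simp only [List.length_replicate]
      omega
    obtain ⟨hL1, -, hget⟩ := pvUpd xmin points (List.replicate n (ymax + 1)) (List.replicate n (ymin - 1)) harg (by simp)
    rw [pvA_flat, hL1]
    simp only [List.length_replicate, List.nil_append]
    rw [pvReindex]
    have hBdef : TriPixel_alt points = (PySem.List.sorted (PySem.Set.ofList (points.map (fun p => pvAt p 0))) (fun x => x) false).foldl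
        (fun acc x =>
          if (PySem.List.max? ((points.filter (fun p => pvAt p 0 == x)).map (fun p => pvAt p 1)) (fun y => y)).getD 0
              ≠ (PySem.List.min? ((points.filter (fun p => pvAt p 0 == x)).map (fun p => pvAt p 1)) (fun y => y)).getD 0
          then (acc ++ [[x, (PySem.List.min? ((points.filter (fun p => pvAt p 0 == x)).map (fun p => pvAt p 1)) (fun y => y)).getD 0]])
                ++ [[x, (PySem.List.max? ((points.filter (fun p => pvAt p 0 == x)).map (fun p => pvAt p 1)) (fun y => y)).getD 0]]
          else acc ++ [[x, (PySem.List.min? ((points.filter (fun p => pvAt p 0 == x)).map (fun p => pvAt p 1)) (fun y => y)).getD 0]]) [] := rfl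
    rw [hBdef, pvB_flat]
    simp only [List.nil_append]
    have hsort : PySem.List.sorted (PySem.Set.ofList (points.map (fun p => pvAt p 0))) (fun x => x) false
        = (PySem.List.pyRange xmin (xmax + 1) 1).filter (fun x => decide (x ∈ points.map (fun p => pvAt p 0))) := by
      apply PySem.List.sorted_eq_of_perm_of_pairwise_lt
      · rw [List.perm_ext_iff_of_nodup (List.Nodup.filter _ (PySem.List.nodup_pyRange_one _ _)) (PySem.Set.nodup_ofList _)]
        intro z
        simp only [List.mem_filter, PySem.List.mem_pyRange_one, PySem.Set.mem_ofList, decide_eq_true_eq]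
        constructor
        · rintro ⟨-, hz⟩
          exact hz
        · intro hz
          obtain ⟨p, hp, he⟩ := List.mem_map.mp hz
          have := hbnd p hp
          exact ⟨by omega, hz⟩
      · exact List.Pairwise.filter _ (PySem.List.pairwise_lt_pyRange_one _ _)
    rw [hsort]
    have hlen2 : ((xmax + 1) - xmin).toNat = n := by omega
    rw [PySem.List.pyRange_one, hlen2, List.filter_map, List.flatMap_map, pvFlatMapIte]
    apply pvFlatMapCongr
    intro k hk
    have hkn : k < n := List.mem_range.mp hk
    have hkrep : k < (List.replicate n (ymax + 1)).length := by simp [hkn]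
    obtain ⟨g1, g2⟩ := hget k hkrep
    have hbcol : ∀ y ∈ pvCol points (xmin + (k : Int)), ymin ≤ y ∧ y ≤ ymax := by
      intro y hy
      have h := pvColBounds points (xmin + (k : Int)) y hy
      rw [hymin, hymax]
      exact h
    rw [pvEmit_eq points ymin ymax xmin _ _ k
          (by rw [g1, List.getD_replicate _ hkn])
          (by rw [g2, List.getD_replicate _ hkn]) hbcol]
    by_cases hcol : pvCol points (xmin + (k : Int)) = []
    · have hx : (xmin + (k : Int)) ∉ points.map (fun p => pvAt p 0) := by
        rw [pvColNe]
        simp [hcol]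
      simp [hcol, hx, Function.comp]
    · have hx : (xmin + (k : Int)) ∈ points.map (fun p => pvAt p 0) := by
        rw [pvColNe]
        exact hcol
      simp [hcol, hx, Function.comp]
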